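-- pv_equiv track=rewrite | github.com/mlkonopelski/quiz-agent | app/ui/gradio_app.py | render_multi_answer_value
-- ===== SOURCE A (Python) =====
-- def render_multi_answer_value(
--     options: list[str],
--     selected_indexes: list[int] | None,
-- ) -> list[str]:
--     if not selected_indexes:
--         return []
--
--     rendered: list[str] = []
--     seen_indexes: set[int] = set()
--     for index in selected_indexes:
--         if index in seen_indexes:
--             continue
--         seen_indexes.add(index)
--         if 0 <= index < len(options):
--             rendered.append(options[index])
--     return rendered
-- ===== SOURCE B (Python) =====
-- def render_multi_answer_value(
--     options: list[str],
--     selected_indexes: list[int] | None,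
-- ) -> list[str]:
--     rendered: list[str] = []
--     rest = list(selected_indexes or [])
--     while rest:
--         head = rest[0]
--         rest = [j for j in rest[1:] if j != head]
--         if 0 <= head < len(options):
--             rendered.append(options[head])
--     return rendered
-- ===== Notes on version B (the rewrite author's own statement) =====
-- stated objective: alternative
-- what changed: Replaces A's seen-set dedup loop by a worklist-nub: repeatedly take the first remaining index and filter all its later duplicates out of the worklist, so no seen set is maintained at all.
import Mathlib
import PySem

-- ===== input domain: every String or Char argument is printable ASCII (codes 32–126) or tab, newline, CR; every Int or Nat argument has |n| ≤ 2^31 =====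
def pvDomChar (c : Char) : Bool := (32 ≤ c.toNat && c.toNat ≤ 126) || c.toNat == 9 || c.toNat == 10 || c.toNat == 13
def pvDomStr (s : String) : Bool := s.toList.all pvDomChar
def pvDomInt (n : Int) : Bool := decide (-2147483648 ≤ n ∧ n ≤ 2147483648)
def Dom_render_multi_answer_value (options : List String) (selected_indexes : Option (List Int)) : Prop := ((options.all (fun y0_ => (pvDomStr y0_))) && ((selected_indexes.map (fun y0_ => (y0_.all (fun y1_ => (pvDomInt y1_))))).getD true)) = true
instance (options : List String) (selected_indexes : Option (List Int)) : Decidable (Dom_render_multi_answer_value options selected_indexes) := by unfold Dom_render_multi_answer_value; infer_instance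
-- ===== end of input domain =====

-- B replaces A's seen-set dedup loop by a worklist-nub: take the first remaining index,
-- filter its later duplicates out of the worklist, repeat — structurally different, same values.


-- ===== PORT A =====
-- A's for-loop, carrying (rendered, seen_indexes)
def raLoop (options : List String) : List Int → List String → PySem.Set Int → List String
  | [], rendered, _ => rendered
  | index :: rest, rendered, seen =>
    if PySem.Set.contains seen index then raLoop options rest rendered seen
    else
      let seen' := PySem.Set.add seen index
      if 0 ≤ index ∧ index < (options.length : Int) then
        raLoop options rest (rendered ++ [(PySem.List.pyGet? options index).getD ""]) seen'
      else raLoop options rest rendered seen'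

def render_multi_answer_value (options : List String) (selected_indexes : Option (List Int)) : List String :=
  match selected_indexes with
  | none => []
  | some xs => if xs = [] then [] else raLoop options xs [] PySem.Set.empty

-- ===== PORT B =====
-- B's while-loop: worklist rest, each step keeps rest[0] and drops its duplicates from the tail
def rbLoop (options : List String) : List Int → List String → List String
  | [], rendered => rendered
  | head :: rest, rendered =>
    let rest' := rest.filter (fun j => j ≠ head)
    if 0 ≤ head ∧ head < (options.length : Int) then
      rbLoop options rest' (rendered ++ [(PySem.List.pyGet? options head).getD ""])
    else rbLoop options rest' rendered
termination_by xs _ => xs.length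
decreasing_by all_goals simpa using Nat.lt_succ_of_le (le_trans (List.length_filter_le _ rest.attach) (by simp))

def render_multi_answer_value_alt (options : List String) (selected_indexes : Option (List Int)) : List String :=
  rbLoop options (selected_indexes.getD []) []

-- ===== PRECONDITION & SPEC =====
def Spec_render_multi_answer_value (options : List String) (selected_indexes : Option (List Int)) (out : List String) : Prop := out = render_multi_answer_value_alt options selected_indexes
instance (options : List String) (selected_indexes : Option (List Int)) (out : List String) : Decidable (Spec_render_multi_answer_value options selected_indexes out) := by unfold Spec_render_multi_answer_value; infer_instance

-- ===== CLAIM (what is proved, stated in full; the proofs are below) =====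
def Claim_equal_render_multi_answer_value : Prop := ∀ (options : List String) (selected_indexes : Option (List Int)), Dom_render_multi_answer_value options selected_indexes → Spec_render_multi_answer_value options selected_indexes (render_multi_answer_value options selected_indexes)

-- ===== LEMMAS AND PROOFS =====
-- common reference: A's loop, with membership in `seen` replaced by "already dropped from the worklist"
theorem raLoop_eq_rbLoop (options : List String) :
    ∀ (xs : List Int) (acc : List String) (seen : PySem.Set Int),
      raLoop options xs acc seen = rbLoop options (xs.filter (fun j => ¬ PySem.Set.contains seen j)) acc := by
  intro xs
  induction xs with
  | nil => intro acc seen; simp [raLoop, rbLoop]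
  | cons i rest ih =>
    intro acc seen
    by_cases h : i ∈ seen
    · simp [raLoop, h, ih]
    · by_cases hr : 0 ≤ i ∧ i < (options.length : Int)
      · simp only [raLoop, hr, List.filter_cons, ih]
        simp [rbLoop, List.filter_filter, hr, h]
        congr 1
        apply List.filter_congr
        intro j _
        exact Bool.and_comm _ _
      · simp only [raLoop, hr, List.filter_cons, ih]
        simp [rbLoop, List.filter_filter, hr, h]
        congr 1
        apply List.filter_congr
        intro j _
        exact Bool.and_comm _ _

theorem render_multi_answer_value_spec : Claim_equal_render_multi_answer_value := by
  intro options selected_indexes _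
  unfold Spec_render_multi_answer_value render_multi_answer_value render_multi_answer_value_alt
  match selected_indexes with
  | none => simp [rbLoop]
  | some xs =>
    by_cases hx : xs = []
    · simp [hx, rbLoop]
    · simp only [hx, if_false, Option.getD_some]
      rw [raLoop_eq_rbLoop]
      congr 1
      simp [PySem.Set.empty]
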